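-- pv_equiv track=rewrite | github.com/Adrian-Garcia/Python-Algorithms | string/vowelStrings.py | vowelStringsAlsoTooSlow
-- ===== SOURCE A (Python) =====
-- from typing import List
--
-- def vowelStringsAlsoTooSlow(
--     words: List[str], queries: List[List[int]]
-- ) -> List[int]:
--     # Basic iterative. Correct but too slow O(n2)
--     vowels = set(["a", "e", "i", "o", "u"])
--     newWords = []
--     response = []
--
--     for word in words:
--         wordLen = len(word)
--         newWords.append(
--             True if word[0] in vowels and word[wordLen - 1] in vowels else False
--         )
--
--     for query in queries:
--         start = query[0]
--         end = query[1]
--         wordsInRange = newWords[start : end + 1]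
--
--         counter = 0
--
--         for word in wordsInRange:
--             if word:
--                 counter += 1
--
--         response.append(counter)
--
--     return response
-- ===== SOURCE B (Python) =====
-- from typing import List
--
-- def vowelStringsAlsoTooSlow(
--     words: List[str], queries: List[List[int]]
-- ) -> List[int]:
--     # Each query [l, r] addresses the slice words[l:r+1]; normalize its bounds with
--     # slice.indices and answer in O(1) from a prefix-sum array of the flags.
--     vowels = set("aeiou")
--
--     prefix = [0]
--     for w in words:
--         prefix.append(prefix[-1] + (w[0] in vowels and w[-1] in vowels))
--
--     n = len(words)
--     response = []
--     for q in queries: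
--         lo, hi, _ = slice(q[0], q[1] + 1).indices(n)
--         response.append(prefix[hi] - prefix[lo] if lo < hi else 0)
--     return response
-- ===== Notes on version B (the rewrite author's own statement) =====
-- stated objective: faster
-- what changed: B precomputes a prefix-sum array of the vowel-bordered flags and answers each query in O(1) as a difference of two prefix sums (query bounds normalized with the standard library's slice.indices), instead of A's per-query slice-and-count scan; Pre_ excludes only the inputs where A raises IndexError (an empty word, or a query with fewer than two elements).
import Mathlib
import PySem

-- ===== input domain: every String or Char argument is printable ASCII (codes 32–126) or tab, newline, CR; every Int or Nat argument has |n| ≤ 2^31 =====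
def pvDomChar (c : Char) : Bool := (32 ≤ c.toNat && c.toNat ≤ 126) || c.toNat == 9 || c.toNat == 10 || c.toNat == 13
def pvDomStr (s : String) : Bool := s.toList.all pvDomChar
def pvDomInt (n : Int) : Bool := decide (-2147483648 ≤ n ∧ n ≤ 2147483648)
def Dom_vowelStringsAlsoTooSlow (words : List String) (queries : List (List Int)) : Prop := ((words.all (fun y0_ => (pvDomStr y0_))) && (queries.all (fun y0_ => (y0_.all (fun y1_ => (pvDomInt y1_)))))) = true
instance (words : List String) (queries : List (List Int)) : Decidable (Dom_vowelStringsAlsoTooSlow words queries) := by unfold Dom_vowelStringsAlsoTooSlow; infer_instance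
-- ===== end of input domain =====

-- B answers each query in O(1) from a precomputed prefix-sum array (bounds normalized with slice.indices) instead of A's per-query slice-and-count scan (objective: faster).

-- ===== PORT A =====
def pvVowels : List Char := PySem.Set.ofList ['a', 'e', 'i', 'o', 'u']

-- word[0] / word[wordLen - 1]; pyGet? = none is Python's IndexError (excluded by Pre_)
def pvIsVowelWordA (word : String) : Bool :=
  let cs := word.toList
  let wordLen : Int := cs.length
  match PySem.List.pyGet? cs 0, PySem.List.pyGet? cs (wordLen - 1) with
  | some c0, some c1 => if pvVowels.contains c0 && pvVowels.contains c1 then true else false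
  | _, _ => false

def vowelStringsAlsoTooSlow (words : List String) (queries : List (List Int)) : List Int :=
  let newWords := words.foldl (fun acc word => acc ++ [pvIsVowelWordA word]) []
  queries.foldl (fun response query =>
    let start := (PySem.List.pyGet? query 0).getD 0
    let end_ := (PySem.List.pyGet? query 1).getD 0
    let wordsInRange := PySem.List.slice newWords (some start) (some (end_ + 1))
    let counter := wordsInRange.foldl (fun c b => if b then c + 1 else c) (0 : Int)
    response ++ [counter]) []

-- ===== PORT B =====
def pvVowelsB : List Char := PySem.Set.ofList "aeiou".toList

-- w[0] in vowels and w[-1] in vowels (as the 0/1 added to the running sum)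
def pvIsVowelWordB (w : String) : Bool :=
  let cs := w.toList
  match PySem.List.pyGet? cs 0, PySem.List.pyGet? cs (-1) with
  | some c0, some c1 => pvVowelsB.contains c0 && pvVowelsB.contains c1
  | _, _ => false

def vowelStringsAlsoTooSlow_alt (words : List String) (queries : List (List Int)) : List Int :=
  -- prefix = [0]; for w in words: prefix.append(prefix[-1] + flag)
  let pref := words.foldl (fun (p : List Int) w =>
      p ++ [PySem.List.pyGetD p (-1) 0 + (if pvIsVowelWordB w then 1 else 0)]) [0]
  let n := words.length
  -- lo, hi, _ = slice(q[0], q[1]+1).indices(n)  — slice.indices with step 1 is PySem.List.clampIdx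
  queries.foldl (fun response q =>
    let lo := PySem.List.clampIdx n ((PySem.List.pyGet? q 0).getD 0)
    let hi := PySem.List.clampIdx n ((PySem.List.pyGet? q 1).getD 0 + 1)
    response ++ [if lo < hi then PySem.List.pyGetD pref (hi : Int) 0 - PySem.List.pyGetD pref (lo : Int) 0 else 0]) []

-- ===== PRECONDITION & SPEC =====
-- Pre_ excludes exactly the inputs where Python A raises: an empty word (IndexError on word[0])
-- or a query with fewer than two elements (IndexError on query[0]/query[1]).
def Pre_vowelStringsAlsoTooSlow (words : List String) (queries : List (List Int)) : Prop :=
  (∀ w ∈ words, w ≠ "") ∧ (∀ q ∈ queries, 2 ≤ q.length)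

instance (words : List String) (queries : List (List Int)) : Decidable (Pre_vowelStringsAlsoTooSlow words queries) := by
  unfold Pre_vowelStringsAlsoTooSlow; infer_instance

def pvWitness_vowelStringsAlsoTooSlow : List String × List (List Int) := (["ae", "xa"], [[0, 1], [-2, 0]])

def Spec_vowelStringsAlsoTooSlow (words : List String) (queries : List (List Int)) (out : List Int) : Prop := out = vowelStringsAlsoTooSlow_alt words queries
instance (words : List String) (queries : List (List Int)) (out : List Int) : Decidable (Spec_vowelStringsAlsoTooSlow words queries out) := by unfold Spec_vowelStringsAlsoTooSlow; infer_instance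

-- ===== CLAIM (what is proved, stated in full; the proofs are below) =====
def Claim_equal_vowelStringsAlsoTooSlow : Prop := ∀ (words : List String) (queries : List (List Int)), Dom_vowelStringsAlsoTooSlow words queries → Pre_vowelStringsAlsoTooSlow words queries → Spec_vowelStringsAlsoTooSlow words queries (vowelStringsAlsoTooSlow words queries)

-- ===== LEMMAS AND PROOFS =====

theorem pv_witness_ok :
    Dom_vowelStringsAlsoTooSlow pvWitness_vowelStringsAlsoTooSlow.1 pvWitness_vowelStringsAlsoTooSlow.2 ∧
    Pre_vowelStringsAlsoTooSlow pvWitness_vowelStringsAlsoTooSlow.1 pvWitness_vowelStringsAlsoTooSlow.2 := by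
  decide

-- the two flag computations agree (word[wordLen-1] and word[-1] denote the same element)
theorem pv_flag_eq (w : String) : pvIsVowelWordA w = pvIsVowelWordB w := by
  have hv : pvVowels = pvVowelsB := by decide
  unfold pvIsVowelWordA pvIsVowelWordB
  rw [hv]
  cases h : w.toList with
  | nil => simp
  | cons c cs =>
      have h1 : ((c :: cs).length : Int) - 1 = ((cs.length : Nat) : Int) := by
        simp [List.length_cons]
      have h2 : PySem.List.pyGet? (c :: cs) (((c :: cs).length : Int) - 1)
              = PySem.List.pyGet? (c :: cs) (-1) := by
        rw [h1, PySem.List.pyGet?_natCast, PySem.List.pyGet?_neg_one,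
            List.getLast?_eq_getElem?]
        simp
      simp only [h2]
      rcases PySem.List.pyGet? (c :: cs) 0 with _ | c0 <;>
        rcases PySem.List.pyGet? (c :: cs) (-1) with _ | c1 <;> simp

theorem pv_foldl_append {α β : Type} (f : α → β) :
    ∀ (l : List α) (a : List β), l.foldl (fun acc x => acc ++ [f x]) a = a ++ l.map f := by
  intro l
  induction l with
  | nil => simp
  | cons x t ih => intro a; simp [ih]

theorem pv_cnt_eq_countP : ∀ (l : List Bool) (c : Int),
    l.foldl (fun c b => if b then c + 1 else c) c = c + (l.countP id : Int) := by
  intro l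
  induction l with
  | nil => simp
  | cons b t ih =>
      intro c
      cases b
      all_goals simp [ih]
      all_goals ring

-- running partial sums of the flags, starting from acc
def pvCounts (ws : List String) (acc : Int) : List Int :=
  match ws with
  | [] => []
  | w :: t =>
      let a := acc + (if pvIsVowelWordB w then 1 else 0)
      a :: pvCounts t a

theorem pv_fold_counts : ∀ (ws : List String) (pre : List Int) (acc : Int),
    pre.getLast? = some acc →
    ws.foldl (fun (p : List Int) w =>
        p ++ [PySem.List.pyGetD p (-1) 0 + (if pvIsVowelWordB w then 1 else 0)]) pre
      = pre ++ pvCounts ws acc := by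
  intro ws
  induction ws with
  | nil => intro pre acc _; simp [pvCounts]
  | cons w t ih =>
      intro pre acc hlast
      have hne : pre ≠ [] := by intro h; rw [h] at hlast; simp at hlast
      have hget : PySem.List.pyGetD pre (-1) 0 = acc := by
        rw [PySem.List.pyGetD_neg_one pre 0 hne]
        rw [List.getLast?_eq_some_getLast hne] at hlast
        exact (Option.some.inj hlast)
      simp only [List.foldl_cons, hget, pvCounts]
      rw [ih (pre ++ [acc + (if pvIsVowelWordB w then 1 else 0)])
            (acc + (if pvIsVowelWordB w then 1 else 0)) (by simp)]
      simp

theorem pv_counts_getD : ∀ (ws : List String) (acc : Int) (k : Nat), k < ws.length →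
    (pvCounts ws acc).getD k 0 = acc + (((ws.take (k + 1)).countP pvIsVowelWordB : Nat) : Int) := by
  intro ws
  induction ws with
  | nil => intro acc k h; simp at h
  | cons w t ih =>
      intro acc k h
      cases k with
      | zero =>
          simp [pvCounts, List.countP_cons]
      | succ j =>
          have hj : j < t.length := by simpa using h
          simp only [pvCounts, List.getD_cons_succ, List.take_succ_cons, List.countP_cons]
          rw [ih _ j hj]
          cases hw : pvIsVowelWordB w
          all_goals simp
          all_goals ring

theorem pv_prefix_getD (ws : List String) (k : Nat) (hk : k ≤ ws.length) :
    PySem.List.pyGetD ([(0 : Int)] ++ pvCounts ws 0) (k : Int) 0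
      = (((ws.take k).countP pvIsVowelWordB : Nat) : Int) := by
  rw [PySem.List.pyGetD_natCast]
  cases k with
  | zero => simp
  | succ j =>
      have hj : j < ws.length := by omega
      have : ([(0 : Int)] ++ pvCounts ws 0).getD (j + 1) 0 = (pvCounts ws 0).getD j 0 := by
        simp [List.getD]
      rw [this, pv_counts_getD ws 0 j hj]
      simp

-- counting a window = difference of the two prefix counts (lo ≤ hi)
theorem pv_window (l : List Bool) (lo hi : Nat) (h : lo ≤ hi) :
    ((((l.drop lo).take (hi - lo)).countP id : Nat) : Int)
      = (((l.take hi).countP id : Nat) : Int) - (((l.take lo).countP id : Nat) : Int) := by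
  have h2 : lo + (hi - lo) = hi := by omega
  have : l.take hi = l.take lo ++ (l.drop lo).take (hi - lo) := by
    rw [← h2, List.take_add]
    simp
  rw [this, List.countP_append]
  push_cast
  omega

theorem pv_per_query (words : List String) (s e : Int) :
    (PySem.List.slice (words.map pvIsVowelWordB) (some s) (some (e + 1))).foldl
        (fun c b => if b then c + 1 else c) (0 : Int)
      = (if PySem.List.clampIdx words.length s < PySem.List.clampIdx words.length (e + 1) then
          PySem.List.pyGetD ([(0 : Int)] ++ pvCounts words 0) ((PySem.List.clampIdx words.length (e + 1) : Nat) : Int) 0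
            - PySem.List.pyGetD ([(0 : Int)] ++ pvCounts words 0) ((PySem.List.clampIdx words.length s : Nat) : Int) 0
         else 0) := by
  set flags := words.map pvIsVowelWordB with hflags
  have hlen : flags.length = words.length := by simp [hflags]
  set lo := PySem.List.clampIdx words.length s with hlo
  set hi := PySem.List.clampIdx words.length (e + 1) with hhi
  have hslice : PySem.List.slice flags (some s) (some (e + 1))
      = (flags.drop lo).take (hi - lo) := by
    simp [PySem.List.slice, hlen, hlo, hhi]
  have htake : ∀ k : Nat, (flags.take k).countP id = (words.take k).countP pvIsVowelWordB := by
    intro k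
    rw [hflags, ← List.map_take, List.countP_map]
    rfl
  rw [hslice, pv_cnt_eq_countP]
  by_cases hcmp : lo < hi
  · rw [if_pos hcmp, pv_window flags lo hi (by omega),
        pv_prefix_getD words hi (by rw [hhi]; exact PySem.List.clampIdx_le _ _),
        pv_prefix_getD words lo (by rw [hlo]; exact PySem.List.clampIdx_le _ _)]
    rw [htake, htake]
    omega
  · have h0 : hi - lo = 0 := by omega
    rw [if_neg hcmp, h0]
    simp

-- ===== VERDICT (by name: the statement is the Claim_ definition above) =====
theorem vowelStringsAlsoTooSlow_spec : Claim_equal_vowelStringsAlsoTooSlow := by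
  intro words queries _ _
  unfold Spec_vowelStringsAlsoTooSlow vowelStringsAlsoTooSlow vowelStringsAlsoTooSlow_alt
  simp only
  rw [pv_foldl_append pvIsVowelWordA words []]
  rw [pv_foldl_append _ queries []]
  rw [pv_fold_counts words [0] 0 (by simp)]
  rw [pv_foldl_append _ queries []]
  simp only [List.nil_append]
  have hmap : words.map pvIsVowelWordA = words.map pvIsVowelWordB :=
    List.map_congr_left (fun w _ => pv_flag_eq w)
  apply List.map_congr_left
  intro q _
  rw [hmap]
  exact pv_per_query words ((PySem.List.pyGet? q 0).getD 0) ((PySem.List.pyGet? q 1).getD 0)
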